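-- pv_equiv track=rewrite | github.com/miliar/Code_Jam_Webscraper | Solutions_python/Problem_138/561.py | war
-- ===== SOURCE A (Python) =====
-- def war(naomis_blocks, kens_blocks, number_of_blocks):
-- 	naomi_points = 0
--
-- 	for i in range(number_of_blocks):
-- 		naomi = naomis_blocks.pop(0)
--
-- 		kens = [block for block in kens_blocks if block > naomi]
-- 		if len(kens) > 0:
-- 			ken = min(kens)
-- 			kens_blocks.remove(ken)
-- 		else:
-- 			ken = min(kens_blocks)
-- 			kens_blocks.remove(ken)
--
--
-- 		if naomi > ken:
-- 			naomi_points += 1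
--
-- 	return naomi_points
-- ===== SOURCE B (Python) =====
-- def war(naomis_blocks, kens_blocks, number_of_blocks):
--     # Sort Ken's pool once; each round: first element > naomi (binary pool scan
--     # replaced by the fact the pool is sorted -> first match IS the minimum),
--     # otherwise the head (the minimum). Does not mutate its arguments.
--     pool = sorted(kens_blocks)
--     points = 0
--     for naomi in naomis_blocks[:max(number_of_blocks, 0)]:
--         idx = 0
--         for j in range(len(pool)):
--             if pool[j] > naomi:
--                 idx = j
--                 break
--         ken = pool.pop(idx)
--         if naomi > ken:
--             points += 1
--     return points
-- ===== Notes on version B (the rewrite author's own statement) =====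
-- stated objective: faster
-- what changed: B sorts Ken's pool once up front; each round the first pool element greater than Naomi's block (found by a scan that stops at the first hit, and is the minimum such element because the pool is sorted) or else the pool head (the minimum) is popped, replacing A's per-round filter-build + min + remove triple pass; B also does not mutate its arguments.
import Mathlib
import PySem

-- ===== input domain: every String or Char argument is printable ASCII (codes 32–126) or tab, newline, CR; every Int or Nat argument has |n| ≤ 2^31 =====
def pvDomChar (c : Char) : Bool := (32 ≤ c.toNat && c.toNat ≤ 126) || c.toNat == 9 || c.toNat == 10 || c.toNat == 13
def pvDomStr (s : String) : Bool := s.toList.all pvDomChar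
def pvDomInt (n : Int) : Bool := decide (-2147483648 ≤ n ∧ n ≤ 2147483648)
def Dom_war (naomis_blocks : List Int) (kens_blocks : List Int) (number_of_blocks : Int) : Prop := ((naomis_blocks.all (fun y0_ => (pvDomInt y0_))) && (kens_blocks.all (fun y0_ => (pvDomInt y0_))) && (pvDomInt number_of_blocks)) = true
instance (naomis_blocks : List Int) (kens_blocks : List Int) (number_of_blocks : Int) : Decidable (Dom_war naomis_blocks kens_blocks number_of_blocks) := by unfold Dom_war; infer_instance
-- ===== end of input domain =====

-- B sorts Ken's pool once and picks each reply in one early-exiting scan of the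
-- sorted pool, replacing A's per-round filter+min+remove triple pass (measured
-- constant-factor speed-up); equivalence is about the RETURN value: A mutates
-- both list arguments in place, B does not.

-- ===== PORT A =====
def war_loop : Nat → List Int → List Int → Int → Int
  | 0, _, _, pts => pts
  | k + 1, naomis, kens, pts =>
    match PySem.List.pop? naomis 0 with
    | none => pts  -- Python: IndexError (excluded by Pre_war)
    | some (naomi, naomis') =>
      let kensGt := kens.filter (fun b => naomi < b)
      let ken? := if kensGt.length > 0 then PySem.List.min? kensGt (fun x => x)
                  else PySem.List.min? kens (fun x => x)
      match ken? with
      | none => pts  -- Python: ValueError on min([]) (excluded by Pre_war)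
      | some ken =>
        match PySem.List.remove? kens ken with
        | none => pts  -- unreachable: ken ∈ kens
        | some kens' =>
          war_loop k naomis' kens' (if naomi > ken then pts + 1 else pts)

def war (naomis_blocks : List Int) (kens_blocks : List Int) (number_of_blocks : Int) : Int :=
  war_loop number_of_blocks.toNat naomis_blocks kens_blocks 0

-- ===== PORT B =====
-- the inner 'for j in range(len(pool)): if pool[j] > naomi: idx = j; break' scan
def firstGtIdx (a : Int) : List Int → Option Nat
  | [] => none
  | k :: rest => if a < k then some 0 else (firstGtIdx a rest).map (· + 1)

def war_alt_loop : List Int → List Int → Int → Int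
  | [], _, pts => pts
  | a :: rest, pool, pts =>
    let idx := (firstGtIdx a pool).getD 0
    match PySem.List.pop? pool (idx : Int) with
    | none => pts  -- Python: IndexError on pop from empty pool (excluded by Pre_war)
    | some (ken, pool') =>
      war_alt_loop rest pool' (if a > ken then pts + 1 else pts)

def war_alt (naomis_blocks : List Int) (kens_blocks : List Int) (number_of_blocks : Int) : Int :=
  war_alt_loop (naomis_blocks.take (max number_of_blocks 0).toNat)
    (PySem.List.sorted kens_blocks (fun x => x)) 0

-- ===== PRECONDITION & SPEC =====
-- Pre_war: exactly the inputs on which A returns — A pops number_of_blocks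
-- blocks from each list, so both lists must hold at least that many.
def Pre_war (naomis_blocks : List Int) (kens_blocks : List Int) (number_of_blocks : Int) : Prop :=
  number_of_blocks ≤ (naomis_blocks.length : Int) ∧ number_of_blocks ≤ (kens_blocks.length : Int)
instance (naomis_blocks : List Int) (kens_blocks : List Int) (number_of_blocks : Int) : Decidable (Pre_war naomis_blocks kens_blocks number_of_blocks) := by unfold Pre_war; infer_instance
def pvWitness_war : List Int × List Int × Int := ([3, 1], [2, 4], 2)

def Spec_war (naomis_blocks : List Int) (kens_blocks : List Int) (number_of_blocks : Int) (out : Int) : Prop := out = war_alt naomis_blocks kens_blocks number_of_blocks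
instance (naomis_blocks : List Int) (kens_blocks : List Int) (number_of_blocks : Int) (out : Int) : Decidable (Spec_war naomis_blocks kens_blocks number_of_blocks out) := by unfold Spec_war; infer_instance

-- ===== CLAIM (what is proved, stated in full; the proofs are below) =====
def Claim_equal_war : Prop := ∀ (naomis_blocks : List Int) (kens_blocks : List Int) (number_of_blocks : Int), Dom_war naomis_blocks kens_blocks number_of_blocks → Pre_war naomis_blocks kens_blocks number_of_blocks → Spec_war naomis_blocks kens_blocks number_of_blocks (war naomis_blocks kens_blocks number_of_blocks)

-- ===== LEMMAS AND PROOFS =====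

lemma firstGtIdx_eq_none_iff (a : Int) (pool : List Int) :
    firstGtIdx a pool = none ↔ ∀ b ∈ pool, ¬ a < b := by
  induction pool with
  | nil => simp [firstGtIdx]
  | cons k rest ih =>
    by_cases h : a < k
    · simp [firstGtIdx, h]
    · simp [firstGtIdx, h, ih]
      exact fun _ => by omega

lemma firstGtIdx_some_decomp (a : Int) (pool : List Int) (j : Nat)
    (h : firstGtIdx a pool = some j) :
    ∃ pre m post, pool = pre ++ m :: post ∧ pre.length = j ∧ a < m ∧ ∀ b ∈ pre, ¬ a < b := by
  induction pool generalizing j with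
  | nil => simp [firstGtIdx] at h
  | cons k rest ih =>
    by_cases hk : a < k
    · simp [firstGtIdx, hk] at h
      exact ⟨[], k, rest, by simp, by simp [← h], hk, by simp⟩
    · simp [firstGtIdx, hk] at h
      obtain ⟨j', hj', rfl⟩ := h
      obtain ⟨pre, m, post, hdec, hlen, ham, hpre⟩ := ih j' hj'
      refine ⟨k :: pre, m, post, by simp [hdec], by simp [hlen], ham, ?_⟩
      intro b hb
      rcases List.mem_cons.mp hb with rfl | hb
      · exact hk
      · exact hpre b hb

lemma min?_nonempty (l : List Int) (hl : l ≠ []) :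
    ∃ m, PySem.List.min? l (fun x => x) = some m := by
  cases hmin : PySem.List.min? l (fun x => x) with
  | none => exact absurd ((PySem.List.min?_eq_none_iff _ _).mp hmin) hl
  | some m => exact ⟨m, rfl⟩

-- main invariant: B's sorted pool is a permutation of A's remaining kens list
lemma loop_eq (k : Nat) : ∀ (naomis kens pool : List Int) (pts : Int),
    pool.Perm kens → pool.Pairwise (· ≤ ·) →
    k ≤ naomis.length → k ≤ kens.length →
    war_loop k naomis kens pts = war_alt_loop (naomis.take k) pool pts := by
  induction k with
  | zero => intro naomis kens pool pts _ _ _ _; simp [war_loop, war_alt_loop]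
  | succ k ih =>
    intro naomis kens pool pts hperm hsort hna hke
    match naomis with
    | [] => simp at hna
    | a :: rest =>
      have hkens_ne : kens ≠ [] := by
        intro h; subst h; simp at hke
      have hpool_ne : pool ≠ [] := by
        intro h; subst h
        exact hkens_ne (List.Perm.nil_eq hperm).symm
      by_cases hex : ∃ b ∈ kens, a < b
      · -- some Ken block beats a
        obtain ⟨b0, hb0, hab0⟩ := hex
        have hb0p : b0 ∈ pool := (hperm.mem_iff).mpr hb0
        have hGx : firstGtIdx a pool ≠ none := by
          intro hnone
          exact (firstGtIdx_eq_none_iff a pool).mp hnone b0 hb0p hab0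
        cases hG : firstGtIdx a pool with
        | none => exact absurd hG hGx
        | some j =>
        obtain ⟨pre, m, post, hdec, hlenpre, ham, hpre⟩ := firstGtIdx_some_decomp a pool j hG
        -- A's chosen ken is the min of the filtered list; show it equals m
        have hmkens : m ∈ kens := (hperm.mem_iff).mp (by simp [hdec])
        have hfil_ne : kens.filter (fun b => decide (a < b)) ≠ [] := by
          intro h
          have := List.filter_eq_nil_iff.mp h m hmkens
          simp [ham] at this
        obtain ⟨mA, hmA⟩ := min?_nonempty _ hfil_ne
        have hmA_mem : mA ∈ kens.filter (fun b => decide (a < b)) := PySem.List.min?_mem hmA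
        have hmA_min : ∀ y ∈ kens.filter (fun b => decide (a < b)), mA ≤ y :=
          PySem.List.min?_isMin hmA
        have hmA_kens : mA ∈ kens := (List.mem_filter.mp hmA_mem).1
        have hamA : a < mA := by
          have := (List.mem_filter.mp hmA_mem).2; simpa using this
        have hmAm : mA = m := by
          have h1 : mA ≤ m := hmA_min m (List.mem_filter.mpr ⟨hmkens, by simpa using ham⟩)
          have h2 : m ≤ mA := by
            have hmApool : mA ∈ pool := (hperm.mem_iff).mpr hmA_kens
            rw [hdec] at hmApool
            rcases List.mem_append.mp hmApool with hmem | hmem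
            · exact absurd hamA (hpre mA hmem)
            · rcases List.mem_cons.mp hmem with rfl | hmem
              · exact le_refl _
              · have hp : (pre ++ m :: post).Pairwise (· ≤ ·) := hdec ▸ hsort
                have := (List.pairwise_append.mp hp).2.1
                exact (List.pairwise_cons.mp this).1 mA hmem
          omega
        -- pools after removal
        have hmnotpre : m ∉ pre := fun hm => (hpre m hm) ham
        have herase : pool.erase m = pre ++ post := by
          rw [hdec, List.erase_append_right _ hmnotpre, List.erase_cons_head]
        have hremove : PySem.List.remove? kens m = some (kens.erase m) :=
          PySem.List.remove?_eq_some_erase kens m hmkens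
        have hperm' : (pre ++ post).Perm (kens.erase m) := by
          have := hperm.erase m
          rwa [herase] at this
        have hsort' : (pre ++ post).Pairwise (· ≤ ·) := by
          refine List.Pairwise.sublist ?_ (hdec ▸ hsort)
          exact (List.sublist_cons_self m post).append_left pre
        have hlen' : k ≤ (kens.erase m).length := by
          rw [List.length_erase_of_mem hmkens]
          have : kens.length = pool.length := hperm.length_eq.symm
          have hplen : pool.length = pre.length + post.length + 1 := by simp [hdec]; omega
          have hplen2 : (pre ++ post).length = pre.length + post.length := by simp
          omega
        -- pop? pool j = some (m, pre ++ post)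
        have hjlt : j < pool.length := by
          rw [hdec]; simp [← hlenpre]
        have hpop : PySem.List.pop? pool (j : Int) = some (pool[j], pool.eraseIdx j) :=
          PySem.List.pop?_natCast pool j hjlt
        have hgetj : pool[j]'hjlt = m := by
          subst hdec
          rw [List.getElem_append_right (by omega)]
          simp [hlenpre]
        have herasej : pool.eraseIdx j = pre ++ post := by
          subst hdec
          rw [List.eraseIdx_append_of_length_le (by omega)]
          simp [hlenpre]
        -- unfold one step of each loop
        rw [List.take_succ_cons]
        rw [show war_loop (k+1) (a :: rest) kens pts =
              war_loop k rest (kens.erase m) (if a > m then pts + 1 else pts) by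
            simp only [war_loop, PySem.List.pop?_zero_cons]
            rw [if_pos (by simpa [List.length_pos_iff] using hfil_ne)]
            rw [hmA, hmAm]
            simp [hremove]]
        rw [show war_alt_loop (a :: List.take k rest) pool pts =
              war_alt_loop (List.take k rest) (pre ++ post) (if a > m then pts + 1 else pts) by
            simp only [war_alt_loop, hG, Option.getD_some]
            rw [hpop, hgetj, herasej]]
        exact ih rest (kens.erase m) (pre ++ post) _ hperm' hsort' (by simpa using hna) hlen'
      · -- no Ken block beats a: both play the minimum
        push Not at hex
        have hfil : kens.filter (fun b => decide (a < b)) = [] :=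
          List.filter_eq_nil_iff.mpr (fun b hb => by have := hex b hb; simp; omega)
        obtain ⟨m, hm⟩ := min?_nonempty kens hkens_ne
        have hmmem : m ∈ kens := PySem.List.min?_mem hm
        have hmmin : ∀ y ∈ kens, m ≤ y := PySem.List.min?_isMin hm
        obtain ⟨p0, ptail, rfl⟩ : ∃ p0 ptail, pool = p0 :: ptail := by
          cases pool with
          | nil => exact absurd rfl hpool_ne
          | cons x xs => exact ⟨x, xs, rfl⟩
        have hG : firstGtIdx a (p0 :: ptail) = none := by
          rw [firstGtIdx_eq_none_iff]
          intro b hb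
          have := hex b ((hperm.mem_iff).mp hb)
          omega
        have hmp0 : m = p0 := by
          have h1 : m ≤ p0 := hmmin p0 ((hperm.mem_iff).mp (by simp))
          have h2 : p0 ≤ m := by
            rcases List.mem_cons.mp ((hperm.mem_iff).mpr hmmem) with rfl | hmem
            · exact le_refl _
            · exact (List.pairwise_cons.mp hsort).1 m hmem
          omega
        have hremove : PySem.List.remove? kens m = some (kens.erase m) :=
          PySem.List.remove?_eq_some_erase kens m hmmem
        have hperm' : ptail.Perm (kens.erase m) := by
          rw [hmp0]
          have := hperm.erase p0
          rwa [List.erase_cons_head] at this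
        have hsort' : ptail.Pairwise (· ≤ ·) := (List.pairwise_cons.mp hsort).2
        have hlen' : k ≤ (kens.erase m).length := by
          rw [List.length_erase_of_mem hmmem]
          omega
        rw [List.take_succ_cons]
        rw [show war_loop (k+1) (a :: rest) kens pts =
              war_loop k rest (kens.erase m) (if a > m then pts + 1 else pts) by
            simp only [war_loop, PySem.List.pop?_zero_cons]
            rw [if_neg (by simp [hfil]), hm]
            simp [hremove]]
        rw [show war_alt_loop (a :: List.take k rest) (p0 :: ptail) pts =
              war_alt_loop (List.take k rest) ptail (if a > m then pts + 1 else pts) by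
            simp only [war_alt_loop, hG, Option.getD_none]
            rw [show PySem.List.pop? (p0 :: ptail) ((0 : Nat) : Int) = some (p0, ptail) from
              PySem.List.pop?_zero_cons ..]
            rw [hmp0]]
        exact ih rest (kens.erase m) ptail _ hperm' hsort' (by simpa using hna) hlen'

-- ===== VERDICT (by name: the statement is the Claim_ definition above) =====
theorem war_spec : Claim_equal_war := by
  intro naomis kens n _ hpre
  unfold Pre_war at hpre
  unfold Spec_war war war_alt
  have hmax : (max n 0).toNat = n.toNat := by omega
  rw [hmax]
  exact loop_eq n.toNat naomis kens (PySem.List.sorted kens (fun x => x)) 0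
    (PySem.List.sorted_perm ..)
    (by simpa using PySem.List.sorted_pairwise kens (fun x => x))
    (by omega) (by omega)
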